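-- pv_equiv track=rewrite | github.com/seongeun42/Algorithm-Solved | 백준/Gold/1013. Contact/Contact.py | check
-- ===== SOURCE A (Python) =====
-- def check(cur, string):
--     cnt = 0
--     if cur < len(string) and string[cur] == '0':
--         cnt += 1
--     while cur < len(string) and string[cur] == '0':
--         cur += 1
--     if cur < len(string) and string[cur] == '1':
--         cnt += 1
--     while cur < len(string) and string[cur] == '1':
--         cur += 1
--     return cur if cnt == 2 else -1
-- ===== SOURCE B (Python) =====
-- def check(cur, string):
--     tail = string[cur:]
--     after_zeros = tail.lstrip('0')
--     zeros = len(tail) - len(after_zeros)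
--     if zeros == 0:
--         return -1
--     after_ones = after_zeros.lstrip('1')
--     ones = len(after_zeros) - len(after_ones)
--     if ones == 0:
--         return -1
--     return cur + zeros + ones
-- ===== Notes on version B (the rewrite author's own statement) =====
-- stated objective: idiomatic
-- what changed: B replaces A's two index-walking while loops and the cnt==2 bookkeeping with slicing plus str.lstrip: it slices the tail at cur, strips the leading '0'-run and then the leading '1'-run, and returns cur plus the two run lengths (or -1 if either run is empty).
-- outside the precondition, e.g. on check(-1, '10'): A returns 1, B returns -1; on check(-5, '01'): A raises IndexError, B returns -3
import Mathlib
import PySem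

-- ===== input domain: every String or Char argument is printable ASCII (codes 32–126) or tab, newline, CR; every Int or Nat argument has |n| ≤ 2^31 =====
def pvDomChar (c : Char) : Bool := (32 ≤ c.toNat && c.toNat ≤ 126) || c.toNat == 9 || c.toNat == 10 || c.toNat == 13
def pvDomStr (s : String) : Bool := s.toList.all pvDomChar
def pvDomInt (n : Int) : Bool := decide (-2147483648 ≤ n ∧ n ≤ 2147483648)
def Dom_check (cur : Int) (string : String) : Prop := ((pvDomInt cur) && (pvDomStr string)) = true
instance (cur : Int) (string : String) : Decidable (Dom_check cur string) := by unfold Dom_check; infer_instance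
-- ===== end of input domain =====

-- B parses the run pair by slicing + lstrip instead of A's index-walking loops; equal on all cur ≥ 0.

-- ===== PORT A =====
-- while cur < len(string) and string[cur] == c: cur += 1
def checkSkip (s : List Char) (c : Char) (cur : Int) : Int :=
  if h : cur < (s.length : Int) ∧ PySem.List.pyGet? s cur = some c then
    checkSkip s c (cur + 1)
  else cur
termination_by ((s.length : Int) - cur).toNat
decreasing_by omega

def check (cur : Int) (string : String) : Int :=
  let s := string.toList
  let cnt : Int :=
    if cur < (s.length : Int) ∧ PySem.List.pyGet? s cur = some '0' then 1 else 0
  let cur1 := checkSkip s '0' cur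
  let cnt1 :=
    cnt + (if cur1 < (s.length : Int) ∧ PySem.List.pyGet? s cur1 = some '1' then 1 else 0)
  let cur2 := checkSkip s '1' cur1
  if cnt1 = 2 then cur2 else -1

-- ===== PORT B =====
-- tail = string[cur:]; lstrip('0') / lstrip('1') ported as dropWhile on the char list
def check_alt (cur : Int) (string : String) : Int :=
  let tail := PySem.List.slice string.toList (some cur) none
  let afterZeros := tail.dropWhile (· == '0')
  let zeros : Int := (tail.length : Int) - (afterZeros.length : Int)
  if zeros = 0 then -1
  else
    let afterOnes := afterZeros.dropWhile (· == '1')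
    let ones : Int := (afterZeros.length : Int) - (afterOnes.length : Int)
    if ones = 0 then -1
    else cur + zeros + ones

-- ===== PRECONDITION & SPEC =====
-- Pre_ excludes negative cur: A raises IndexError for cur < -len(string), and for -len ≤ cur < 0
-- Python's negative-index wraparound makes A read a discontinuous character sequence that diverges
-- from slicing — a corner no caller (the judge feeds only nonnegative scan positions) would specify.
def Pre_check (cur : Int) (string : String) : Prop := 0 ≤ cur
instance (cur : Int) (string : String) : Decidable (Pre_check cur string) := by
  unfold Pre_check; infer_instance

def pvWitness_check : Int × String := (0, "0011")

def Spec_check (cur : Int) (string : String) (out : Int) : Prop := out = check_alt cur string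
instance (cur : Int) (string : String) (out : Int) : Decidable (Spec_check cur string out) := by
  unfold Spec_check; infer_instance

-- ===== CLAIM (what is proved, stated in full; the proofs are below) =====
def Claim_equal_check : Prop := ∀ (cur : Int) (string : String), Dom_check cur string → Pre_check cur string → Spec_check cur string (check cur string)

-- ===== LEMMAS AND PROOFS =====

-- checkSkip from a nonnegative cursor advances by the length of the leading c-run of the tail.
theorem checkSkip_eq (s : List Char) (c : Char) (cur : Int) (h : 0 ≤ cur) :
    checkSkip s c cur = cur + (((s.drop cur.toNat).takeWhile (· == c)).length : Int) := by
  fun_induction checkSkip s c cur with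
  | case1 cur hcond ih =>
      obtain ⟨hlt, hget⟩ := hcond
      have hcur : cur.toNat < s.length := by omega
      have hget' : s[cur.toNat] = c := by
        rw [PySem.List.pyGet?_of_nonneg s h] at hget
        simpa [List.getElem?_eq_getElem hcur] using hget
      have hdrop : s.drop cur.toNat = s[cur.toNat] :: s.drop (cur.toNat + 1) :=
        List.drop_eq_getElem_cons hcur
      have ih' := ih (by omega)
      have htn : (cur + 1).toNat = cur.toNat + 1 := by omega
      rw [ih', hdrop, htn]
      simp [List.takeWhile, hget']
      omega
  | case2 cur hcond =>
      have hempty : ((s.drop cur.toNat).takeWhile (· == c)) = [] := by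
        rcases Decidable.em (cur < (s.length : Int)) with hlt | hge
        · have hcur : cur.toNat < s.length := by omega
          have hne : ¬ (s[cur.toNat] == c) = true := by
            intro hc
            apply hcond
            refine ⟨hlt, ?_⟩
            rw [PySem.List.pyGet?_of_nonneg s h]
            simp only [List.getElem?_eq_getElem hcur, Option.some.injEq]
            exact eq_of_beq hc
          rw [List.drop_eq_getElem_cons hcur]
          simp [List.takeWhile, hne]
        · have hnil : s.drop cur.toNat = [] := List.drop_eq_nil_of_le (by omega)
          simp [hnil]
      simp [hempty]

-- the loop guard holds iff the leading c-run of the tail is nonempty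
theorem guard_iff (s : List Char) (c : Char) (cur : Int) (h : 0 ≤ cur) :
    (cur < (s.length : Int) ∧ PySem.List.pyGet? s cur = some c)
      ↔ ((s.drop cur.toNat).takeWhile (· == c)).length ≠ 0 := by
  rcases Decidable.em (cur < (s.length : Int)) with hlt | hge
  · have hcur : cur.toNat < s.length := by omega
    have hdrop : s.drop cur.toNat = s[cur.toNat] :: s.drop (cur.toNat + 1) :=
      List.drop_eq_getElem_cons hcur
    rw [PySem.List.pyGet?_of_nonneg s h, hdrop, List.getElem?_eq_getElem hcur]
    by_cases hc : (s[cur.toNat] == c) = true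
    · have hce : s[cur.toNat] = c := eq_of_beq hc
      simp [List.takeWhile, hlt, hce]
    · have hce : ¬ s[cur.toNat] = c := fun e => hc (by simp [e])
      simp [List.takeWhile, hc, hce]
  · have hnil : s.drop cur.toNat = [] := List.drop_eq_nil_of_le (by omega)
    have hnone : s[cur.toNat]? = none := List.getElem?_eq_none (by omega)
    rw [PySem.List.pyGet?_of_nonneg s h, hnil, hnone]
    simp

theorem takeWhile_drop (l : List Char) (p : Char → Bool) :
    l.drop (l.takeWhile p).length = l.dropWhile p := by
  induction l with
  | nil => simp
  | cons a l ih =>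
      by_cases h : p a
      · simpa [List.takeWhile, List.dropWhile, h] using ih
      · simp [List.takeWhile, List.dropWhile, h]

-- ===== VERDICT (by name: the statement is the Claim_ definition above) =====
theorem check_spec : Claim_equal_check := by
  intro cur string _ hpre
  unfold Spec_check
  simp only [check, check_alt]
  have h0 : (0:Int) ≤ cur := hpre
  have hslice : PySem.List.slice string.toList (some cur) none
      = string.toList.drop cur.toNat := PySem.List.slice_from string.toList h0
  rw [hslice]
  have hz := checkSkip_eq string.toList '0' cur h0
  have h1 : (0:Int) ≤ cur + (((string.toList.drop cur.toNat).takeWhile (· == '0')).length : Int) := by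
    omega
  have hdrop1 : string.toList.drop
        (cur + (((string.toList.drop cur.toNat).takeWhile (· == '0')).length : Int)).toNat
      = (string.toList.drop cur.toNat).dropWhile (· == '0') := by
    have he : (cur + (((string.toList.drop cur.toNat).takeWhile (· == '0')).length : Int)).toNat
        = cur.toNat + ((string.toList.drop cur.toNat).takeWhile (· == '0')).length := by omega
    rw [he, ← List.drop_drop, takeWhile_drop]
  have ho := checkSkip_eq string.toList '1' _ h1
  rw [hdrop1] at ho
  have hg0 := guard_iff string.toList '0' cur h0
  have hg1 := guard_iff string.toList '1' _ h1
  rw [hdrop1] at hg1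
  have hzlen : ((string.toList.drop cur.toNat).length : Int)
      - (((string.toList.drop cur.toNat).dropWhile (· == '0')).length : Int)
      = (((string.toList.drop cur.toNat).takeWhile (· == '0')).length : Int) := by
    have hp := List.takeWhile_append_dropWhile (p := (· == '0')) (l := string.toList.drop cur.toNat)
    have hl : ((string.toList.drop cur.toNat).takeWhile (· == '0')).length
        + ((string.toList.drop cur.toNat).dropWhile (· == '0')).length
        = (string.toList.drop cur.toNat).length := by
      rw [← List.length_append, hp]
    omega
  have holen : ((((string.toList.drop cur.toNat).dropWhile (· == '0')).length : Nat) : Int)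
      - (((((string.toList.drop cur.toNat).dropWhile (· == '0')).dropWhile (· == '1')).length : Nat) : Int)
      = ((((string.toList.drop cur.toNat).dropWhile (· == '0')).takeWhile (· == '1')).length : Int) := by
    have hp := List.takeWhile_append_dropWhile (p := (· == '1'))
      (l := (string.toList.drop cur.toNat).dropWhile (· == '0'))
    have hl : (((string.toList.drop cur.toNat).dropWhile (· == '0')).takeWhile (· == '1')).length
        + (((string.toList.drop cur.toNat).dropWhile (· == '0')).dropWhile (· == '1')).length
        = ((string.toList.drop cur.toNat).dropWhile (· == '0')).length := by
      rw [← List.length_append, hp]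
    omega
  rw [hz, ho, hzlen, holen]
  by_cases hz0 : ((string.toList.drop cur.toNat).takeWhile (· == '0')).length = 0
  · have hng0 : ¬ (cur < (string.toList.length : Int)
        ∧ PySem.List.pyGet? string.toList cur = some '0') := by
      rw [hg0]; omega
    rw [if_neg hng0]
    split_ifs <;> omega
  · have hgz : cur < (string.toList.length : Int)
        ∧ PySem.List.pyGet? string.toList cur = some '0' := hg0.mpr hz0
    rw [if_pos hgz]
    by_cases ho0 : (((string.toList.drop cur.toNat).dropWhile (· == '0')).takeWhile
        (· == '1')).length = 0
    · have hng1 : ¬ _ := hg1.not.mpr (by omega)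
      rw [if_neg hng1]
      split_ifs <;> omega
    · have hg1' := hg1.mpr ho0
      rw [if_pos hg1']
      split_ifs <;> omega
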